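-- pv_equiv track=rewrite | github.com/van4956/project_clash_royale | modules/timer_processor.py | group_class_name
-- ===== SOURCE A (Python) =====
-- from typing import List, Tuple, Optional, Dict, Any
-- from collections import deque, Counter, defaultdict
--
-- def group_class_name(rows: List[List[str]], threshold: int = 3) -> List[str]:  # TODO: по умолчанию 3 - правильно
--     """
--     Принимает список строк, состоящих из перечня class_name, и пороговое значение threshold.
--
--     Берём элемент в первой строке и идём вниз, вырезая совпадения
--     Новая итерация — берём первый любой элемент и снова вниз
--     Собираем все группы (cls, size), сортируем по size убыв., фильтруем по threshold,
--     возвращаем список class_name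
--
--     Возвращает список class_name, у которых после группировки получилось >=threshold
--     """
--     # 1) построчные счётчики
--     per_row = [Counter(row) for row in rows]
--
--     # 2) группируем построчные количества по классам
--     by_class: defaultdict[str, List[int]] = defaultdict(list)
--
--     # Собираем все классы, которые встречались хотя бы где-то (множество)
--     all_classes = set()
--     for rc in per_row:
--         all_classes.update(rc.keys())
--
--     for cls in all_classes:
--         # Считаем количество классов в каждой строке per_row
--         counts = [rc.get(cls, 0) for rc in per_row]
--         if sum(counts) == 0:
--             continue
--
--         # 3) Формируем группы для этого класса (cls)
--         while True:
--             # Находим индексы строк, где остались элементы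
--             pos_idx = [i for i, v in enumerate(counts) if v > 0]
--             if not pos_idx:
--                 break
--             # Размер группы = количество строк с положительным остатком
--             group_size = len(pos_idx)
--             by_class[cls].append(group_size)
--             # Вычитаем по одному из всех строк, где ещё оставались элементы
--             for i in pos_idx:
--                 counts[i] -= 1
--
--     # 4) Соберём все группы (class_name, size)
--     grouped: List[Tuple[str, int]] = []
--     for cls, sizes in by_class.items():
--         for s in sizes:
--             grouped.append((cls, s))
--
--     # 5) сортировка по размеру группы убыв. (детерминированный вывод, для тестов)
--     grouped.sort(key=lambda x: (-x[1], x[0]))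
--
--     # 6) фильтр по порогу и возврат class_name
--     result = [cls for cls, size in grouped if size >= threshold]
--     return result
-- ===== SOURCE B (Python) =====
-- from collections import Counter
-- from bisect import bisect_left
--
-- def group_class_name(rows, threshold=3):
--     # one pass over the data: for each class, the list of its per-row counts (rows where it occurs)
--     counts_by_class = {}
--     for row in rows:
--         for cls, c in Counter(row).items():
--             counts_by_class.setdefault(cls, []).append(c)
--     grouped = []
--     for cls, counts in counts_by_class.items():
--         counts.sort()
--         n = len(counts)
--         # conjugate partition: the k-th group size is the number of rows with count >= k
--         for k in range(1, counts[-1] + 1):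
--             size = n - bisect_left(counts, k)
--             if size >= threshold:
--                 grouped.append((cls, size))
--     grouped.sort(key=lambda x: (-x[1], x[0]))
--     return [cls for cls, size in grouped]
-- ===== Notes on version B (the rewrite author's own statement) =====
-- stated objective: faster
-- what changed: B builds each class's per-row count list in one pass over the rows (no per-row Counter table, no class set, no per-class rescan of all rows) and reads the group sizes off the conjugate partition by binary search on the sorted count list, generating only sizes that pass the threshold, instead of A's while-loop that repeatedly rescans and decrements a full per-row count vector once per group.
import Mathlib
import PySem

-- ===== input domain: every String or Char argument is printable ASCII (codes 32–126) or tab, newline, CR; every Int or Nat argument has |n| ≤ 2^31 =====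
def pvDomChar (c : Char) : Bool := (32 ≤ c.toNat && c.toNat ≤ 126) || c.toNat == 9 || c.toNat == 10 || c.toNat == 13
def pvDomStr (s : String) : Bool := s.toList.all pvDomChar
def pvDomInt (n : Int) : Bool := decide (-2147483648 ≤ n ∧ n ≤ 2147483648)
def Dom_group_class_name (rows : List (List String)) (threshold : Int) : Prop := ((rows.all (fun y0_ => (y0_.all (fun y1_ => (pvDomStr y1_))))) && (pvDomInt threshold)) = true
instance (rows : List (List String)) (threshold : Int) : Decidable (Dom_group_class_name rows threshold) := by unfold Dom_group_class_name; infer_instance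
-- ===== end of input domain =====

-- B replaces A's per-group rescan-and-decrement loop by the conjugate partition of the
-- per-class count list, read off by binary search on the sorted counts (objective: faster).
-- A iterates a Python set in step 3; the final sort's key (-size, cls) is injective on the
-- (cls, size) pairs, so the returned list does not depend on that iteration order.

-- ===== PORT A =====

-- termination helper for the while-loop: decrementing the positive entries strictly
-- decreases the sum of their absolute parts
theorem pvSumDecLe (counts : List Int) :
    ((counts.map (fun v => if 0 < v then v - 1 else v)).map Int.toNat).sum
      ≤ (counts.map Int.toNat).sum := by
  induction counts with
  | nil => simp
  | cons v t ih =>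
    simp only [List.map_cons, List.sum_cons]
    have : (if 0 < v then v - 1 else v).toNat ≤ v.toNat := by split <;> omega
    omega

theorem pvSumDec (counts : List Int) (h : ∃ v ∈ counts, 0 < v) :
    ((counts.map (fun v => if 0 < v then v - 1 else v)).map Int.toNat).sum
      < (counts.map Int.toNat).sum := by
  induction counts with
  | nil => simp at h
  | cons v t ih =>
    simp only [List.map_cons, List.sum_cons]
    rcases h with ⟨w, hw, hwpos⟩
    rcases List.mem_cons.mp hw with rfl | hwt
    · have h1 : (if 0 < w then w - 1 else w).toNat < w.toNat := by split <;> omega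
      have := pvSumDecLe t
      omega
    · have h1 : (if 0 < v then v - 1 else v).toNat ≤ v.toNat := by split <;> omega
      have := ih ⟨w, hwt, hwpos⟩
      omega

-- step 3: while some row still has a positive remainder, record how many do, decrement them
def pvGroupSizes (counts : List Int) : List Int :=
  let posIdx := (PySem.List.enumerate counts).filter (fun p => decide (0 < p.2))
  if h : posIdx.isEmpty then []
  else (posIdx.length : Int) :: pvGroupSizes (counts.map (fun v => if 0 < v then v - 1 else v))
termination_by (counts.map Int.toNat).sum
decreasing_by
  simp only [List.map_subtype, List.unattach_attach]
  apply pvSumDec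
  have hne : posIdx ≠ [] := by simpa [List.isEmpty_iff] using h
  rcases List.exists_mem_of_ne_nil _ hne with ⟨p, hp⟩
  have hp' := List.mem_filter.mp hp
  have hmem : p.2 ∈ counts := by
    have h2 : p.2 ∈ (PySem.List.enumerate counts 0).map (fun q => q.2) :=
      List.mem_map_of_mem hp'.1
    rw [PySem.List.map_snd_enumerate] at h2
    exact h2
  exact ⟨p.2, hmem, by simpa using hp'.2⟩

def group_class_name (rows : List (List String)) (threshold : Int) : List String :=
  let per_row := rows.map (fun row => PySem.Dict.counter row)
  let all_classes : PySem.Set String :=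
    per_row.foldl (fun s rc => PySem.Set.update s rc.keys) PySem.Set.empty
  let by_class : PySem.Dict String (List Int) :=
    all_classes.foldl (fun d cls =>
      let counts := per_row.map (fun rc => rc.getD cls 0)
      if counts.sum = 0 then d
      else d.insert cls (d.getD cls [] ++ pvGroupSizes counts)) PySem.Dict.empty
  let grouped : List (String × Int) :=
    by_class.items.foldl (fun acc p => acc ++ p.2.map (fun s => (p.1, s))) []
  let sortedG := PySem.List.sorted2 grouped (fun x => -x.2) (fun x => x.1)
  (sortedG.filter (fun p => decide (threshold ≤ p.2))).map (fun p => p.1)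

-- ===== PORT B =====

def group_class_name_alt (rows : List (List String)) (threshold : Int) : List String :=
  let counts_by_class : PySem.Dict String (List Int) :=
    rows.foldl (fun d row =>
      (PySem.Dict.counter row).items.foldl
        (fun d p => d.modify p.1 [] (fun l => l ++ [p.2])) d)
      PySem.Dict.empty
  let grouped : List (String × Int) :=
    counts_by_class.items.foldl (fun acc p =>
      let counts := PySem.List.sorted p.2 (fun v => v)
      let n := counts.length
      -- counts[-1]: every stored list is nonempty, so the .getD 0 default is never used
      (PySem.List.pyRange 1 (((PySem.List.pyGet? counts (-1)).getD 0) + 1)).foldl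
        (fun acc k =>
          let size : Int := (n : Int) - (PySem.List.bisectLeft counts k : Int)
          if threshold ≤ size then acc ++ [(p.1, size)] else acc) acc) []
  let sortedG := PySem.List.sorted2 grouped (fun x => -x.2) (fun x => x.1)
  sortedG.map (fun p => p.1)

-- ===== PRECONDITION & SPEC =====
def Spec_group_class_name (rows : List (List String)) (threshold : Int) (out : List String) : Prop := out = group_class_name_alt rows threshold
instance (rows : List (List String)) (threshold : Int) (out : List String) : Decidable (Spec_group_class_name rows threshold out) := by unfold Spec_group_class_name; infer_instance

-- ===== CLAIM (what is proved, stated in full; the proofs are below) =====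
def Claim_equal_group_class_name : Prop := ∀ (rows : List (List String)) (threshold : Int), Dom_group_class_name rows threshold → Spec_group_class_name rows threshold (group_class_name rows threshold)

-- ===== LEMMAS AND PROOFS =====

-- ---- abbreviations used only by the proofs ----

def pvCnt (cls : String) (row : List String) : Int := (List.count cls row : Int)
def pvFull (rows : List (List String)) (cls : String) : List Int :=
  rows.map (fun row => pvCnt cls row)
def pvPos (rows : List (List String)) (cls : String) : List Int :=
  rows.flatMap (fun row => if cls ∈ row then [pvCnt cls row] else [])
def pvS (rows : List (List String)) : PySem.Set String := PySem.Set.ofList rows.flatten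
def pvGA (rows : List (List String)) : List (String × Int) :=
  (pvS rows).flatMap (fun cls => (pvGroupSizes (pvFull rows cls)).map (fun s => (cls, s)))

-- ---- generic list/set helpers ----

theorem pvUpdate_ofList {α : Type} [BEq α] [LawfulBEq α] (l : List α) :
    ∀ (s : PySem.Set α), PySem.Set.update s (PySem.Set.ofList l) = PySem.Set.update s l := by
  induction l using List.reverseRecOn with
  | nil => intro s; rfl
  | append_singleton l x ih =>
    intro s
    have h1 : PySem.Set.ofList (l ++ [x]) = (PySem.Set.ofList l).add x :=
      PySem.Set.ofList_append_singleton l x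
    by_cases hx : x ∈ PySem.Set.ofList l
    · have h2 : (PySem.Set.ofList l).add x = PySem.Set.ofList l := PySem.Set.add_of_mem hx
      have hxl : x ∈ l := (PySem.Set.mem_ofList l x).mp hx
      have h3 : PySem.Set.update s (l ++ [x]) = (PySem.Set.update s l).add x := by
        simp [PySem.Set.update, List.foldl_append]
      rw [h1, h2, ih, h3]
      have hmem : x ∈ PySem.Set.update s l := (PySem.Set.mem_update s l x).mpr (Or.inr hxl)
      rw [PySem.Set.add_of_mem hmem]
    · have h2 : (PySem.Set.ofList l).add x = PySem.Set.ofList l ++ [x] := PySem.Set.add_of_not_mem hx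
      have h3 : PySem.Set.update s (l ++ [x]) = (PySem.Set.update s l).add x := by
        simp [PySem.Set.update, List.foldl_append]
      have h4 : PySem.Set.update s (PySem.Set.ofList l ++ [x])
          = (PySem.Set.update s (PySem.Set.ofList l)).add x := by
        simp [PySem.Set.update, List.foldl_append]
      rw [h1, h2, h4, ih, h3]

theorem pvUpdate_append {α : Type} [BEq α] (s : PySem.Set α) (a b : List α) :
    PySem.Set.update s (a ++ b) = PySem.Set.update (PySem.Set.update s a) b := by
  simp [PySem.Set.update, List.foldl_append]

theorem pvFoldl_update_ofList {α : Type} [BEq α] [LawfulBEq α] (rows : List (List α)) :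
    ∀ (s : PySem.Set α),
      rows.foldl (fun s row => PySem.Set.update s (PySem.Set.ofList row)) s
        = PySem.Set.update s rows.flatten := by
  induction rows with
  | nil => intro s; rfl
  | cons r rs ih =>
    intro s
    simp only [List.foldl_cons, List.flatten_cons]
    rw [ih, pvUpdate_ofList, pvUpdate_append]

theorem pvUpdate_nil {α : Type} [BEq α] (l : List α) :
    PySem.Set.update [] l = PySem.Set.ofList l := by
  simp [PySem.Set.update, PySem.Set.ofList_eq_foldl]

theorem pvUpdate_flatMap {α β : Type} [BEq β] (g : α → List β) (rows : List α) :
    ∀ (s : PySem.Set β), PySem.Set.update s (rows.flatMap g)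
      = rows.foldl (fun s row => PySem.Set.update s (g row)) s := by
  induction rows with
  | nil => intro s; rfl
  | cons r rs ih => intro s; rw [List.flatMap_cons, pvUpdate_append, ih, List.foldl_cons]

theorem pvFilter_flatMap {α β : Type} (g : α → List β) (p : β → Bool) (l : List α) :
    (l.flatMap g).filter p = l.flatMap (fun x => (g x).filter p) := by
  induction l with
  | nil => rfl
  | cons r rs ih => rw [List.flatMap_cons, List.filter_append, ih, List.flatMap_cons]

theorem pvFlatMap_congr {α β : Type} (l : List α) (f g : α → List β)
    (h : ∀ x ∈ l, f x = g x) : l.flatMap f = l.flatMap g := by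
  induction l with
  | nil => rfl
  | cons r rs ih =>
    rw [List.flatMap_cons, List.flatMap_cons, h r List.mem_cons_self,
      ih (fun x hx => h x (List.mem_cons_of_mem _ hx))]

theorem pvSumPos (l : List Int) (h0 : ∀ v ∈ l, 0 ≤ v) (v : Int) (hv : v ∈ l) (hvp : 0 < v) :
    0 < l.sum := by
  induction l with
  | nil => simp at hv
  | cons a t ih =>
    simp only [List.sum_cons]
    rcases List.mem_cons.mp hv with rfl | ht
    · have : 0 ≤ t.sum := List.sum_nonneg (fun x hx => h0 x (List.mem_cons_of_mem _ hx))
      omega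
    · have ha := h0 a (List.mem_cons_self)
      have := ih (fun x hx => h0 x (List.mem_cons_of_mem _ hx)) ht
      omega

theorem pvPosIdx_length (xs : List Int) : ∀ (s : Int),
    ((PySem.List.enumerate xs s).filter (fun p => decide (0 < p.2))).length
      = xs.countP (fun v => decide (0 < v)) := by
  induction xs with
  | nil => intro s; simp [PySem.List.enumerate]
  | cons x t ih =>
    intro s
    rw [PySem.List.enumerate_cons]
    by_cases hx : 0 < x <;> simp [hx, ih (s+1)]

-- ---- the while-loop computes the conjugate partition ----

theorem pvGroupSizes_eq (M : Nat) : ∀ (counts : List Int),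
    (∀ v ∈ counts, v ≤ (M : Int)) → (M = 0 ∨ ∃ v ∈ counts, v = (M : Int)) →
    pvGroupSizes counts
      = (PySem.List.pyRange 1 ((M : Int) + 1)).map
          (fun k => ((counts.countP (fun v => decide (k ≤ v)) : Nat) : Int)) := by
  induction M with
  | zero =>
    intro counts hub _
    have hcnt : counts.countP (fun v => decide (0 < v)) = 0 := by
      rw [List.countP_eq_zero]
      intro v hv; simpa using not_lt.mpr (hub v hv)
    have hempty : ((PySem.List.enumerate counts 0).filter (fun p => decide (0 < p.2))).isEmpty = true := by
      rw [List.isEmpty_iff_length_eq_zero, pvPosIdx_length]; exact hcnt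
    rw [pvGroupSizes]
    simp only [hempty, dite_true]
    rw [PySem.List.pyRange_one_eq_nil (by norm_num)]
    rfl
  | succ M ih =>
    intro counts hub hhit
    rcases hhit with h0 | ⟨w, hw, hwM⟩
    · exact absurd h0 (Nat.succ_ne_zero M)
    have hwpos : 0 < w := by rw [hwM]; exact_mod_cast Nat.succ_pos M
    have hEmp : ((PySem.List.enumerate counts 0).filter (fun p => decide (0 < p.2))).isEmpty = false := by
      rw [Bool.eq_false_iff]
      intro hE
      rw [List.isEmpty_iff_length_eq_zero, pvPosIdx_length] at hE
      rw [List.countP_eq_zero] at hE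
      exact absurd (by simpa using hE w hw) (not_not.mpr hwpos)
    rw [pvGroupSizes]
    simp only [hEmp, Bool.false_eq_true, dite_false]
    have hcast : ((M + 1 : Nat) : Int) + 1 = ((M : Int) + 1) + 1 := by push_cast; ring
    rw [hcast, PySem.List.pyRange_one_cons (by omega)]
    have hhead : (((PySem.List.enumerate counts 0).filter (fun p => decide (0 < p.2))).length : Int)
        = ((counts.countP (fun v => decide (1 ≤ v)) : Nat) : Int) := by
      have h1 : counts.countP (fun v => decide (0 < v)) = counts.countP (fun v => decide (1 ≤ v)) :=
        List.countP_congr (fun v _ => by simp only [decide_eq_true_eq]; omega)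
      rw [pvPosIdx_length, h1]
    have hub' : ∀ v' ∈ counts.map (fun v => if 0 < v then v - 1 else v), v' ≤ (M : Int) := by
      intro v' hv'
      rcases List.mem_map.mp hv' with ⟨v, hv, rfl⟩
      have := hub v hv
      push_cast at this ⊢
      split <;> omega
    have hhit' : M = 0 ∨ ∃ v' ∈ counts.map (fun v => if 0 < v then v - 1 else v), v' = (M : Int) := by
      right
      refine ⟨(if 0 < w then w - 1 else w), List.mem_map_of_mem hw, ?_⟩
      rw [if_pos hwpos, hwM]
      push_cast; ring
    have htail := ih (counts.map (fun v => if 0 < v then v - 1 else v)) hub' hhit'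
    rw [htail]
    have hshiftP : ∀ k ∈ PySem.List.pyRange 1 ((M : Int) + 1),
        (fun k => (((counts.map (fun v => if 0 < v then v - 1 else v)).countP
            (fun v => decide (k ≤ v)) : Nat) : Int)) k
          = (fun k => ((counts.countP (fun v => decide (k + 1 ≤ v)) : Nat) : Int)) k := by
      intro k hk
      have hk1 : 1 ≤ k := (PySem.List.mem_pyRange_one.mp hk).1
      simp only [List.countP_map]
      congr 1
      apply List.countP_congr
      intro v _
      by_cases h : 0 < v <;> simp [h] <;> omega
    rw [List.map_congr_left hshiftP]
    have hshiftR : PySem.List.pyRange (1 + 1) (((M : Int) + 1) + 1)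
        = (PySem.List.pyRange 1 ((M : Int) + 1)).map (fun k => k + 1) := by
      rw [PySem.List.pyRange_one, PySem.List.pyRange_one]
      have h1 : (((M : Int) + 1) + 1 - (1 + 1)).toNat = M := by omega
      have h2 : ((M : Int) + 1 - 1).toNat = M := by omega
      rw [h1, h2, List.map_map]
      apply List.map_congr_left
      intro j _
      simp only [Function.comp]
      ring
    rw [hshiftR, List.map_cons, List.map_map]
    rw [List.cons.injEq]
    refine ⟨hhead, ?_⟩
    apply List.map_congr_left
    intro k _
    rfl

-- ---- bisect / sorted facts ----

theorem pvBisect_eq_countP (xs : List Int) (k : Int)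
    (h : List.Pairwise (fun a b => a ≤ b) xs) :
    PySem.List.bisectLeft xs k = xs.countP (fun v => decide (v < k)) := by
  obtain ⟨hle, hlt, hge⟩ := PySem.List.bisectLeft_spec xs k h
  set b := PySem.List.bisectLeft xs k with hb
  have hsplit : xs = xs.take b ++ xs.drop b := (List.take_append_drop b xs).symm
  rw [hsplit, List.countP_append]
  have h1 : (xs.take b).countP (fun v => decide (v < k)) = (xs.take b).length := by
    rw [List.countP_eq_length]
    intro v hv
    rcases List.mem_iff_getElem.mp hv with ⟨i, hi, rfl⟩
    rw [List.getElem_take]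
    have hib : i < b := by
      have := List.length_take_le b xs
      omega
    simpa using hlt i (by omega) hib
  have h2 : (xs.drop b).countP (fun v => decide (v < k)) = 0 := by
    rw [List.countP_eq_zero]
    intro v hv
    rcases List.mem_iff_getElem.mp hv with ⟨i, hi, rfl⟩
    rw [List.getElem_drop]
    have := hge (b + i) (by rw [List.length_drop] at hi; omega) (by omega)
    simpa using not_lt.mpr this
  rw [h1, h2, List.length_take, Nat.add_zero]
  omega

theorem pvSize_eq_countP (xs : List Int) (k : Int)
    (h : List.Pairwise (fun a b => a ≤ b) xs) :
    (xs.length : Int) - (PySem.List.bisectLeft xs k : Int)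
      = ((xs.countP (fun v => decide (k ≤ v)) : Nat) : Int) := by
  rw [pvBisect_eq_countP xs k h]
  have hsum : xs.countP (fun v => decide (v < k)) + xs.countP (fun v => decide (k ≤ v)) = xs.length := by
    have := List.length_eq_countP_add_countP (fun v => decide (v < k)) (l := xs)
    have hneg : xs.countP (fun a => decide ¬(decide (a < k) = true)) = xs.countP (fun v => decide (k ≤ v)) :=
      List.countP_congr (fun v _ => by simp only [decide_eq_true_eq]; omega)
    omega
  omega

theorem pvSortedLast (xs : List Int) (hne : xs ≠ []) :
    ((PySem.List.pyGet? (PySem.List.sorted xs (fun v => v)) (-1)).getD 0) ∈ xs ∧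
    ∀ v ∈ xs, v ≤ ((PySem.List.pyGet? (PySem.List.sorted xs (fun v => v)) (-1)).getD 0) := by
  set s := PySem.List.sorted xs (fun v => v) with hs
  have hperm : s.Perm xs := PySem.List.sorted_perm xs (fun v => v) false
  have hlen : s.length = xs.length := hperm.length_eq
  have hsne : s ≠ [] := by
    intro h0
    have h1 : xs.length = 0 := by rw [← hlen, h0]; rfl
    exact hne (List.eq_nil_of_length_eq_zero h1)
  have hslen : 0 < s.length := List.length_pos_iff.mpr hsne
  have hget : PySem.List.pyGet? s (-1) = some s[s.length - 1] := by
    simp only [PySem.List.pyGet?, PySem.List.pyIdx?]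
    norm_num
    rw [if_pos (by omega), Option.bind_some]
    exact List.getElem?_eq_getElem (by omega)
  rw [hget, Option.getD_some]
  constructor
  · exact hperm.mem_iff.mp (List.getElem_mem _)
  · intro v hv
    rcases List.mem_iff_getElem.mp (hperm.mem_iff.mpr hv) with ⟨i, hi, rfl⟩
    have := PySem.List.key_sorted_getElem_mono xs (fun v => v)
      (p := i) (q := s.length - 1) (by omega) (by rw [← hs]; omega)
    simpa [← hs] using this

-- ---- the tuple sort key and filtering ----

theorem pvSorted2_eq_sorted (xs : List (String × Int)) :
    PySem.List.sorted2 xs (fun x => -x.2) (fun x => x.1)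
      = PySem.List.sorted xs (fun x => (toLex ((-x.2 : Int), x.1) : Int ×ₗ String)) := by
  rw [PySem.List.sorted2, PySem.List.sorted_eq_foldl_insertBy]
  have hbefore : (fun (a b : String × Int) =>
      decide ((-a.2 : Int) < -b.2) || (!decide ((-b.2 : Int) < -a.2) && decide (a.1 < b.1)))
      = (fun (a b : String × Int) =>
        decide ((toLex ((-a.2 : Int), a.1) : Int ×ₗ String) < toLex ((-b.2 : Int), b.1))) := by
    funext a b
    rw [Bool.eq_iff_iff]
    simp only [Bool.or_eq_true, Bool.and_eq_true, Bool.not_eq_true', decide_eq_true_eq,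
      decide_eq_false_iff_not, Prod.Lex.lt_iff, ofLex_toLex]
    constructor
    · rintro (h | ⟨h1, h2⟩)
      · exact Or.inl h
      · rcases lt_or_eq_of_le (not_lt.mp h1) with h3 | h3
        · exact Or.inl h3
        · exact Or.inr ⟨h3, h2⟩
    · rintro (h | ⟨h1, h2⟩)
      · exact Or.inl h
      · exact Or.inr ⟨not_lt.mpr (le_of_eq h1), h2⟩
  simp only [if_neg (by simp : ¬ (false = true))]
  rw [hbefore]

theorem pvKeyInj : Function.Injective
    (fun x : String × Int => (toLex ((-x.2 : Int), x.1) : Int ×ₗ String)) := by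
  intro a b h
  have h' := congrArg (fun y => (ofLex y : Int × String)) h
  simp only [ofLex_toLex] at h'
  have h1 : -a.2 = -b.2 := congrArg Prod.fst h'
  have h2 : a.1 = b.1 := congrArg Prod.snd h'
  exact Prod.ext h2 (by omega)

theorem pvFilter_sorted2 (G : List (String × Int)) (p : String × Int → Bool) :
    (PySem.List.sorted2 G (fun x => -x.2) (fun x => x.1)).filter p
      = PySem.List.sorted2 (G.filter p) (fun x => -x.2) (fun x => x.1) := by
  rw [pvSorted2_eq_sorted, pvSorted2_eq_sorted]
  apply PySem.List.eq_of_perm_of_pairwise_le_of_injective _ pvKeyInj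
  · exact ((PySem.List.sorted_perm G _ false).filter p).trans
      (PySem.List.sorted_perm (G.filter p) _ false).symm
  · exact (PySem.List.sorted_pairwise G _).sublist List.filter_sublist
  · exact PySem.List.sorted_pairwise (G.filter p) _

-- ---- dict loop shapes ----

theorem pvFoldl_foldl {α β δ : Type} (g : α → List β) (f : δ → β → δ) (rows : List α) :
    ∀ (init : δ), rows.foldl (fun d row => (g row).foldl f d) init
      = (rows.flatMap g).foldl f init := by
  induction rows with
  | nil => intro init; rfl
  | cons r rs ih => intro init; simp only [List.foldl_cons, List.flatMap_cons, List.foldl_append, ih]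

theorem pvItems_foldl_insert (F : String → List Int) (l : List String) :
    ∀ (d : PySem.Dict String (List Int)), l.Nodup → (∀ c ∈ l, d.contains c = false) →
    (l.foldl (fun d c => d.insert c (d.getD c [] ++ F c)) d).items
      = d.items ++ l.map (fun c => (c, F c)) := by
  induction l with
  | nil => intro d _ _; simp
  | cons c t ih =>
    intro d hnd hfresh
    simp only [List.foldl_cons, List.map_cons]
    have hc : d.contains c = false := hfresh c List.mem_cons_self
    have hgetD : d.getD c [] = [] := PySem.Dict.getD_of_not_contains d [] hc
    have hfresh' : ∀ c' ∈ t, (d.insert c (d.getD c [] ++ F c)).contains c' = false := by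
      intro c' hc'
      rw [PySem.Dict.contains_insert]
      have hne : c' ≠ c := fun h => (List.nodup_cons.mp hnd).1 (h ▸ hc')
      simp [hne, hfresh c' (List.mem_cons_of_mem _ hc')]
    rw [ih _ (List.nodup_cons.mp hnd).2 hfresh']
    rw [PySem.Dict.items_insert_of_not_contains d _ hc, hgetD]
    simp

theorem pvFilter_beq_nodup {α : Type} [BEq α] [LawfulBEq α] (l : List α) (hnd : l.Nodup) (c : α) :
    l.filter (fun x => x == c) = if c ∈ l then [c] else [] := by
  induction l with
  | nil => simp
  | cons a t ih =>
    rcases List.nodup_cons.mp hnd with ⟨ha, hnt⟩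
    by_cases hac : a = c
    · subst hac
      rw [List.filter_cons]
      simp only [BEq.rfl, if_true]
      have : a ∉ t := ha
      rw [ih hnt]
      simp [this]
    · rw [List.filter_cons]
      have : (a == c) = false := beq_eq_false_iff_ne.mpr hac
      simp only [this, Bool.false_eq_true, if_false]
      rw [ih hnt]
      by_cases hct : c ∈ t
      · simp [hct, List.mem_cons]
      · have hca : ¬ c = a := fun h => hac h.symm
        simp [List.mem_cons, hca, hct]

-- ---- basic facts about pvS / pvFull / pvPos ----

theorem pvMem_pvS (rows : List (List String)) (cls : String) :
    cls ∈ pvS rows ↔ ∃ row ∈ rows, cls ∈ row := by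
  simp [pvS, PySem.Set.mem_ofList, List.mem_flatten]

theorem pvFull_nonneg (rows : List (List String)) (cls : String) :
    ∀ v ∈ pvFull rows cls, 0 ≤ v := by
  intro v hv
  rcases List.mem_map.mp hv with ⟨row, _, rfl⟩
  simp [pvCnt]

theorem pvPos_mem (rows : List (List String)) (cls : String) :
    ∀ v ∈ pvPos rows cls, 1 ≤ v ∧ v ∈ pvFull rows cls := by
  intro v hv
  rcases List.mem_flatMap.mp hv with ⟨row, hrow, hvr⟩
  by_cases hc : cls ∈ row
  · rw [if_pos hc] at hvr
    rcases List.mem_singleton.mp hvr with rfl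
    constructor
    · have : 0 < List.count cls row := List.count_pos_iff.mpr hc
      simp only [pvCnt]; omega
    · exact List.mem_map.mpr ⟨row, hrow, rfl⟩
  · rw [if_neg hc] at hvr; simp at hvr

theorem pvPos_ne_nil (rows : List (List String)) (cls : String)
    (h : cls ∈ pvS rows) : pvPos rows cls ≠ [] := by
  rcases (pvMem_pvS rows cls).mp h with ⟨row, hrow, hcl⟩
  intro h0
  have : pvCnt cls row ∈ pvPos rows cls :=
    List.mem_flatMap.mpr ⟨row, hrow, by rw [if_pos hcl]; exact List.mem_singleton.mpr rfl⟩
  rw [h0] at this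
  simp at this

theorem pvCountP_pos_full (rows : List (List String)) (cls : String) (k : Int) (hk : 1 ≤ k) :
    (pvPos rows cls).countP (fun v => decide (k ≤ v))
      = (pvFull rows cls).countP (fun v => decide (k ≤ v)) := by
  induction rows with
  | nil => rfl
  | cons r rs ih =>
    simp only [pvPos, pvFull, List.flatMap_cons, List.map_cons, List.countP_append,
      List.countP_cons] at *
    by_cases hc : cls ∈ r
    · rw [if_pos hc]
      simp only [List.countP_cons, List.countP_nil]
      omega
    · rw [if_neg hc]
      have hz : pvCnt cls r = 0 := by
        simp only [pvCnt]
        have := List.count_eq_zero.mpr hc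
        omega
      have : (decide (k ≤ pvCnt cls r)) = false := by
        rw [hz]; simp; omega
      simp only [List.countP_nil, this, Bool.false_eq_true, if_false]
      omega

-- ---- side A reduced to canonical form ----

theorem pvA_eq (rows : List (List String)) (threshold : Int) :
    group_class_name rows threshold
      = ((PySem.List.sorted2 (pvGA rows) (fun x => -x.2) (fun x => x.1)).filter
          (fun p => decide (threshold ≤ p.2))).map (fun p => p.1) := by
  rw [group_class_name]
  -- the class set is pvS rows
  have hclasses : (rows.map (fun row => PySem.Dict.counter row)).foldl
      (fun s rc => PySem.Set.update s rc.keys) PySem.Set.empty = pvS rows := by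
    rw [List.foldl_map]
    simp only [PySem.Dict.keys_counter]
    rw [pvFoldl_update_ofList rows PySem.Set.empty]
    exact pvUpdate_nil rows.flatten
  rw [hclasses]
  -- per-class counts are pvFull, and the sum-zero guard never fires on pvS
  have hstep : ∀ (d : PySem.Dict String (List Int)), ∀ cls ∈ pvS rows,
      (fun d cls =>
        let counts := (rows.map (fun row => PySem.Dict.counter row)).map (fun rc => rc.getD cls 0)
        if counts.sum = 0 then d
        else d.insert cls (d.getD cls [] ++ pvGroupSizes counts)) d cls
      = d.insert cls (d.getD cls [] ++ pvGroupSizes (pvFull rows cls)) := by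
    intro d cls hcls
    have hcounts : (rows.map (fun row => PySem.Dict.counter row)).map (fun rc => rc.getD cls 0)
        = pvFull rows cls := by
      rw [List.map_map]
      simp only [Function.comp_def, PySem.Dict.getD_counter]
      rfl
    simp only [hcounts]
    rcases (pvMem_pvS rows cls).mp hcls with ⟨row, hrow, hcl⟩
    have hpos : 0 < pvCnt cls row := by
      have := List.count_pos_iff.mpr hcl
      simp only [pvCnt]; omega
    have hsum : ¬ ((pvFull rows cls).sum = 0) := by
      have := pvSumPos (pvFull rows cls) (pvFull_nonneg rows cls)
        (pvCnt cls row) (List.mem_map.mpr ⟨row, hrow, rfl⟩) hpos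
      omega
    rw [if_neg hsum]
  rw [PySem.List.foldl_congr_mem _ _ _ _ (fun d cls hcls => hstep d cls hcls)]
  rw [pvItems_foldl_insert (fun cls => pvGroupSizes (pvFull rows cls)) (pvS rows)
      PySem.Dict.empty (PySem.Set.nodup_ofList _) (fun c _ => PySem.Dict.contains_empty c)]
  have hei : (PySem.Dict.empty : PySem.Dict String (List Int)).items = [] := rfl
  rw [hei, List.nil_append]
  rw [PySem.List.foldl_append_eq_flatMap, List.flatMap_map]
  rfl

-- ---- side B reduced to canonical form ----

theorem pvB_eq (rows : List (List String)) (threshold : Int) :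
    group_class_name_alt rows threshold
      = (PySem.List.sorted2 ((pvGA rows).filter (fun p => decide (threshold ≤ p.2)))
          (fun x => -x.2) (fun x => x.1)).map (fun p => p.1) := by
  rw [group_class_name_alt]
  -- the dict of per-class count lists: keys pvS, values pvPos
  have hdict : rows.foldl (fun (d : PySem.Dict String (List Int)) row =>
      (PySem.Dict.counter row).items.foldl
        (fun d p => d.modify p.1 [] (fun l => l ++ [p.2])) d) PySem.Dict.empty
      = (rows.flatMap (fun row => (PySem.Dict.counter row).items)).foldl
        (fun (d : PySem.Dict String (List Int)) p => d.modify p.1 [] (fun l => l ++ [p.2]))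
        PySem.Dict.empty :=
    pvFoldl_foldl _ _ rows PySem.Dict.empty
  set pairs := rows.flatMap (fun row => (PySem.Dict.counter row).items) with hpairs
  set D := pairs.foldl (fun (d : PySem.Dict String (List Int)) p => d.modify p.1 [] (fun l => l ++ [p.2])) PySem.Dict.empty with hD
  rw [hdict]
  have hkeys : D.keys = pvS rows := by
    rw [hD, PySem.Dict.keys_foldl_modify_key pairs (fun p => p.1) [] (fun _ p => fun l => l ++ [p.2])]
    rw [PySem.Dict.keys_empty]
    have hmapfst : pairs.map (fun p => p.1) = rows.flatMap (fun row => PySem.Set.ofList row) := by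
      rw [hpairs, List.map_flatMap]
      apply pvFlatMap_congr
      intro row _
      have hid : ((fun (p : String × Int) => p.1) ∘ fun k => (k, (List.count k row : Int))) = id := by
        funext k; rfl
      rw [PySem.Dict.items_counter, List.map_map, hid, List.map_id]
    rw [hmapfst, pvUpdate_flatMap, pvFoldl_update_ofList]
    exact pvUpdate_nil rows.flatten
  have hnodup : D.keys.Nodup := by
    rw [hD]
    exact PySem.Dict.nodup_keys_foldl_modify_key pairs (fun p => p.1) [] (fun _ p => fun l => l ++ [p.2])
      PySem.Dict.empty PySem.Dict.nodup_keys_empty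
  have hgetD : ∀ cls, D.getD cls [] = pvPos rows cls := by
    intro cls
    rw [hD, PySem.Dict.getD_foldl_modify_append pairs PySem.Dict.empty cls]
    have hempty : (PySem.Dict.empty : PySem.Dict String (List Int)).getD cls [] = [] :=
      PySem.Dict.getD_of_not_contains _ [] (PySem.Dict.contains_empty cls)
    rw [hempty, List.nil_append, hpairs, pvFilter_flatMap]
    rw [List.map_flatMap]
    apply pvFlatMap_congr
    intro row _
    rw [PySem.Dict.items_counter, List.filter_map]
    have hpred : ((fun (p : String × Int) => p.1 == cls) ∘ (fun k => (k, (List.count k row : Int))))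
        = (fun x => x == cls) := by
      funext x; rfl
    have hfil : (PySem.Set.ofList row).filter ((fun p => p.1 == cls) ∘ (fun k => (k, (List.count k row : Int))))
        = if cls ∈ row then [cls] else [] := by
      rw [hpred, pvFilter_beq_nodup (PySem.Set.ofList row) (PySem.Set.nodup_ofList row) cls]
      by_cases hc : cls ∈ row
      · rw [if_pos ((PySem.Set.mem_ofList row cls).mpr hc), if_pos hc]
      · rw [if_neg (fun h => hc ((PySem.Set.mem_ofList row cls).mp h)), if_neg hc]
    rw [hfil]
    by_cases hc : cls ∈ row
    · simp [hc, pvCnt]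
    · simp [hc]
  have hitems : D.items = (pvS rows).map (fun cls => (cls, pvPos rows cls)) := by
    rw [PySem.Dict.items_eq_map_keys D hnodup []]
    rw [hkeys]
    apply List.map_congr_left
    intro cls _
    rw [hgetD]
  rw [hitems]
  -- the per-class loop appends the filtered conjugate sizes
  have hinner : ∀ (acc : List (String × Int)), ∀ q ∈ (pvS rows).map (fun cls => (cls, pvPos rows cls)),
      (fun acc (p : String × List Int) =>
        let counts := PySem.List.sorted p.2 (fun v => v)
        let n := counts.length
        (PySem.List.pyRange 1 (((PySem.List.pyGet? counts (-1)).getD 0) + 1)).foldl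
          (fun acc k =>
            let size : Int := (n : Int) - (PySem.List.bisectLeft counts k : Int)
            if threshold ≤ size then acc ++ [(p.1, size)] else acc) acc) acc q
      = acc ++ ((pvGroupSizes (pvFull rows q.1)).map (fun s => (q.1, s))).filter
          (fun p => decide (threshold ≤ p.2)) := by
    intro acc q hq
    rcases List.mem_map.mp hq with ⟨cls, hcls, rfl⟩
    simp only
    set counts := PySem.List.sorted (pvPos rows cls) (fun v => v) with hcounts
    set M : Int := (PySem.List.pyGet? counts (-1)).getD 0 with hM
    have hpairwise : List.Pairwise (fun a b => a ≤ b) counts := by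
      have := PySem.List.sorted_pairwise (pvPos rows cls) (fun v => v)
      simpa using this
    have hperm : counts.Perm (pvPos rows cls) := PySem.List.sorted_perm _ _ false
    obtain ⟨hMmem0, hMmax0⟩ := pvSortedLast (pvPos rows cls) (pvPos_ne_nil rows cls hcls)
    have hMmem : M ∈ pvPos rows cls := hMmem0
    have hMmax : ∀ v ∈ pvPos rows cls, v ≤ M := hMmax0
    have hM1 : 1 ≤ M := (pvPos_mem rows cls M hMmem).1
    -- conjugate characterisation of A's sizes with bound M
    have hub : ∀ v ∈ pvFull rows cls, v ≤ (M.toNat : Int) := by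
      intro v hv
      rcases List.mem_map.mp hv with ⟨row, hrow, rfl⟩
      by_cases hc : cls ∈ row
      · have : pvCnt cls row ∈ pvPos rows cls :=
          List.mem_flatMap.mpr ⟨row, hrow, by rw [if_pos hc]; exact List.mem_singleton.mpr rfl⟩
        have := hMmax _ this
        omega
      · have hz := List.count_eq_zero.mpr hc
        simp only [pvCnt]
        omega
    have hhit : M.toNat = 0 ∨ ∃ v ∈ pvFull rows cls, v = (M.toNat : Int) := by
      right
      exact ⟨M, (pvPos_mem rows cls M hMmem).2, by omega⟩
    have hA := pvGroupSizes_eq M.toNat (pvFull rows cls) hub hhit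
    have hMcast : ((M.toNat : Nat) : Int) = M := by omega
    rw [hMcast] at hA
    -- B's size expression equals the conjugate count
    have hsz : ∀ k, 1 ≤ k →
        ((counts.length : Int) - (PySem.List.bisectLeft counts k : Int))
          = (((pvFull rows cls).countP (fun v => decide (k ≤ v)) : Nat) : Int) := by
      intro k hk
      rw [pvSize_eq_countP counts k hpairwise]
      rw [hperm.countP_eq, pvCountP_pos_full rows cls k hk]
    rw [PySem.List.foldl_append_ite (fun k => threshold ≤ (counts.length : Int) - (PySem.List.bisectLeft counts k : Int))
      (fun k => (cls, (counts.length : Int) - (PySem.List.bisectLeft counts k : Int)))]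
    rw [hA, List.filter_map, List.filter_map, List.map_map]
    congr 1
    have hfcongr : ∀ k ∈ PySem.List.pyRange 1 (M + 1),
        (decide (threshold ≤ (counts.length : Int) - (PySem.List.bisectLeft counts k : Int)))
        = (((fun p => decide (threshold ≤ p.2)) ∘ (fun s => (cls, s))) ∘
            fun k => (((pvFull rows cls).countP (fun v => decide (k ≤ v)) : Nat) : Int)) k := by
      intro k hk
      have hk1 : 1 ≤ k := (PySem.List.mem_pyRange_one.mp hk).1
      simp only [Function.comp]
      rw [hsz k hk1]
    rw [List.filter_congr hfcongr]
    apply List.map_congr_left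
    intro k hk
    have hk1 : 1 ≤ k := (PySem.List.mem_pyRange_one.mp (List.mem_filter.mp hk).1).1
    simp only [Function.comp]
    rw [hsz k hk1]
  rw [PySem.List.foldl_congr_mem _ _ _ _ hinner]
  rw [PySem.List.foldl_append_eq_flatMap, List.nil_append]
  have hflat : ((pvS rows).map (fun cls => (cls, pvPos rows cls))).flatMap
      (fun q => ((pvGroupSizes (pvFull rows q.1)).map (fun s => (q.1, s))).filter
        (fun p => decide (threshold ≤ p.2)))
      = (pvGA rows).filter (fun p => decide (threshold ≤ p.2)) := by
    rw [List.flatMap_map, pvGA, pvFilter_flatMap]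
  rw [hflat]

-- ===== VERDICT (by name: the statement is the Claim_ definition above) =====
theorem group_class_name_spec : Claim_equal_group_class_name := by
  intro rows threshold _
  unfold Spec_group_class_name
  rw [pvA_eq, pvB_eq, pvFilter_sorted2]
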